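-- pv_equiv track=rewrite | github.com/Benjir1/Elemi-programozasi-tetelek | ept/tetel2.py | vizsgalat
-- ===== SOURCE A (Python) =====
-- def vizsgalat(tomb):
--     van = False
--     for i in range(0, len(tomb)):
--         tomb[i] = int(tomb[i])
--     for i in range(0, len(tomb)):
--         elem = tomb[i]
--         if elem > 0:
--             van = True
--         else:
--             van = False
--     if van == True:
--         return "A megadott tömbben van pozitív szám!"
--     if van == False:
--         return "A megadott tömbben nincs pozitív szám!"
-- ===== SOURCE B (Python) =====
-- def vizsgalat(tomb):
--     # Note: A mutates tomb in place (int-converts each slot); B does not mutate.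
--     # A's final `van` flag is overwritten on every iteration, so it reflects
--     # only the last element; B tests that element directly, with no loop.
--     if tomb and int(tomb[-1]) > 0:
--         return "A megadott tömbben van pozitív szám!"
--     return "A megadott tömbben nincs pozitív szám!"
-- ===== Notes on version B (the rewrite author's own statement) =====
-- stated objective: simpler
-- what changed: A's two loops (in-place int conversion, then a flag overwritten on every iteration so it reflects only the last element) are replaced by a loop-free direct test of the last element; B does not mutate the list (return value only).
import Mathlib
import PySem

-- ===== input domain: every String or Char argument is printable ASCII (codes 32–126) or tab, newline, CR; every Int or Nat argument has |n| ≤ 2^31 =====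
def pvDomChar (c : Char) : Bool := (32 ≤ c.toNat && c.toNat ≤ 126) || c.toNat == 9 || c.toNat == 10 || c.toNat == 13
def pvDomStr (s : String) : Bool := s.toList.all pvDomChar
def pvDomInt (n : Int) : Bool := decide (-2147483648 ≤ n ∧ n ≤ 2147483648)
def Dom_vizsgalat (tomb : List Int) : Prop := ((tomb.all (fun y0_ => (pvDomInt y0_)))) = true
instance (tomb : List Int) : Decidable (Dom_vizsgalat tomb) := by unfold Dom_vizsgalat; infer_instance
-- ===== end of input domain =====

-- B replaces A's two loops by a loop-free last-element test; equivalence is about the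
-- return value only (A int-converts the list in place, B does not mutate).


-- ===== PORT A =====
def vizsgalat (tomb : List Int) : String :=
  -- van = False; for i: tomb[i] = int(tomb[i])  (int() is the identity on int)
  let tomb := tomb.map (fun x => x)
  -- for i: elem = tomb[i]; van = (elem > 0)  (overwritten each iteration)
  let van := tomb.foldl (fun _ elem => decide (elem > 0)) false
  if van = true then "A megadott tömbben van pozitív szám!"
  else "A megadott tömbben nincs pozitív szám!"

-- ===== PORT B =====
def vizsgalat_alt (tomb : List Int) : String :=
  -- if tomb and int(tomb[-1]) > 0
  if tomb ≠ [] ∧ (PySem.List.pyGet? tomb (-1)).getD 0 > 0 then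
    "A megadott tömbben van pozitív szám!"
  else "A megadott tömbben nincs pozitív szám!"

-- ===== PRECONDITION & SPEC =====
def Spec_vizsgalat (tomb : List Int) (out : String) : Prop := out = vizsgalat_alt tomb
instance (tomb : List Int) (out : String) : Decidable (Spec_vizsgalat tomb out) := by unfold Spec_vizsgalat; infer_instance

-- ===== CLAIM (what is proved, stated in full; the proofs are below) =====
def Claim_equal_vizsgalat : Prop := ∀ (tomb : List Int), Dom_vizsgalat tomb → Spec_vizsgalat tomb (vizsgalat tomb)

-- ===== LEMMAS AND PROOFS =====

-- the overwritten flag equals the test on the last element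
theorem pv_foldl_last (l : List Int) (b : Bool) :
    l.foldl (fun _ elem => decide (elem > 0)) b =
      match l.getLast? with
      | none => b
      | some x => decide (x > 0) := by
  induction l generalizing b with
  | nil => rfl
  | cons a t ih =>
    simp only [List.foldl]
    rw [ih]
    cases h : t.getLast? with
    | none => simp [List.getLast?_cons, h]  -- t = [] case
    | some x => simp [List.getLast?_cons, h]

theorem pv_pyGet_neg_one (l : List Int) :
    (PySem.List.pyGet? l (-1)).getD 0 = (l.getLast?).getD 0 := by
  induction l with
  | nil => rfl
  | cons a t ih =>
    cases h : t.getLast? with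
    | none =>
      cases t with
      | nil => simp [PySem.List.pyGet?, PySem.List.pyIdx?]
      | cons b t' => simp at h
    | some x =>
      have hne : t ≠ [] := by cases t <;> simp_all
      simp only [List.getLast?_cons, h, Option.getD_some]
      -- pyGet? (a :: t) (-1) = element at positive index length-1
      simp only [PySem.List.pyGet?, PySem.List.pyIdx?, List.length_cons]
      split_ifs with h1 h2 <;> try omega
      · have hidx : t.length + 1 - (-(-1 : Int)).toNat = t.length := by omega
        rw [hidx]
        simp only [Option.bind_some]
        have hg : (a :: t)[t.length]? = (a :: t).getLast? := by
          rw [List.getLast?_eq_getElem?]; simp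
        rw [hg]
        simp [List.getLast?_cons, h]

-- ===== VERDICT (by name: the statement is the Claim_ definition above) =====
theorem vizsgalat_spec : Claim_equal_vizsgalat := by
  intro tomb _
  unfold Spec_vizsgalat vizsgalat vizsgalat_alt
  simp only [List.map_id']
  rw [pv_foldl_last]
  rw [pv_pyGet_neg_one]
  cases h : tomb.getLast? with
  | none =>
    have : tomb = [] := by cases tomb <;> simp_all
    simp [this]
  | some x =>
    have : tomb ≠ [] := by intro he; subst he; simp at h
    by_cases hx : x > 0 <;> simp [this, hx]
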